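-- pv_equiv track=rewrite | github.com/AndreM92/Social_Media_Crawler_2024 | YouTube_Profile_Crawler_2025.py | base_url
-- ===== SOURCE A (Python) =====
-- def base_url(url):
--     to_remove = ['/videos', '/about', '/featured', '/playlists']
--     for e in to_remove:
--         if e in url:
--             url = url.split(e)[0]
--     if url[-1] == '/':
--         url = url[:-1]
--     return url
-- ===== SOURCE B (Python) =====
-- def base_url(url):
--     cuts = [p for p in (url.find(e) for e in ('/videos', '/about', '/featured', '/playlists')) if p >= 0]
--     if cuts:
--         url = url[:min(cuts)]
--     if url[-1] == '/':
--         url = url[:-1]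
--     return url
-- ===== Notes on version B (the rewrite author's own statement) =====
-- stated objective: alternative
-- what changed: Instead of sequentially mutating the url by split-and-reassign for each suffix, B computes all first-occurrence positions once and performs a single slice at the globally earliest suffix position.
import Mathlib
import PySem

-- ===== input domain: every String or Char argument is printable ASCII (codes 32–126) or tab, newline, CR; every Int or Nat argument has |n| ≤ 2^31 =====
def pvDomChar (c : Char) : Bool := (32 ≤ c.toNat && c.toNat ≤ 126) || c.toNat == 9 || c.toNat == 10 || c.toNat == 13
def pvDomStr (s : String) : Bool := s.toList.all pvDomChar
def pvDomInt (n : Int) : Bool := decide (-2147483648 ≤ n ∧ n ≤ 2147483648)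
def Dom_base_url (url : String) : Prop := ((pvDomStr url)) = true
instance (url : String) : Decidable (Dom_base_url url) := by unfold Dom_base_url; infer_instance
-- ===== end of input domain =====

-- B replaces A's sequential split-and-reassign per suffix by computing all first-occurrence
-- positions once and making a single slice at the earliest one (objective: alternative).

-- ===== PORT A =====
-- to_remove = ['/videos', '/about', '/featured', '/playlists']
def pvToRemove : List (List Char) :=
  ["/videos".toList, "/about".toList, "/featured".toList, "/playlists".toList]

-- for e in to_remove: if e in url: url = url.split(e)[0]
-- then: if url[-1] == '/': url = url[:-1]   (url[-1] on '' is an IndexError: excluded by Pre_)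
-- url.split(e)[0] is ported as pyGetD … 0 []: split always returns a non-empty list, so the
-- index 0 never raises in Python.
def base_url (url : String) : String :=
  let cs := pvToRemove.foldl
    (fun u e => if PySem.Chars.isIn e u then PySem.List.pyGetD (PySem.Chars.splitOn u e) 0 [] else u)
    url.toList
  String.ofList (if PySem.Chars.pyGet? cs (-1) = some '/' then PySem.Chars.slice cs none (some (-1)) else cs)

-- ===== PORT B =====
def pvSuffixes : List (List Char) :=
  ["/videos".toList, "/about".toList, "/featured".toList, "/playlists".toList]

-- cuts = [p for p in (url.find(e) for e in (…)) if p >= 0]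
-- if cuts: url = url[:min(cuts)]
-- then the same trailing-slash strip as A (url[-1] on '' is an IndexError: excluded by Pre_)
def base_url_alt (url : String) : String :=
  let cs := url.toList
  let cuts := (pvSuffixes.map (fun e => PySem.Chars.find cs e)).filter (fun p => decide (0 ≤ p))
  let cs2 := match PySem.List.min? cuts id with
    | some m => PySem.Chars.slice cs none (some m)
    | none => cs
  String.ofList (if PySem.Chars.pyGet? cs2 (-1) = some '/' then PySem.Chars.slice cs2 none (some (-1)) else cs2)

-- ===== PRECONDITION & SPEC =====
-- Pre_ excludes exactly the inputs where Python A raises IndexError at url[-1]: the empty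
-- string and strings that begin with one of the four suffixes (there the cut leaves '').
-- Python B raises the same IndexError there.
def Pre_base_url (url : String) : Prop :=
  url ≠ "" ∧ ¬ ("/videos".toList <+: url.toList) ∧ ¬ ("/about".toList <+: url.toList) ∧
    ¬ ("/featured".toList <+: url.toList) ∧ ¬ ("/playlists".toList <+: url.toList)

instance (url : String) : Decidable (Pre_base_url url) := by unfold Pre_base_url; infer_instance

def pvWitness_base_url : String := "https://www.youtube.com/c/crawler/videos"

def Spec_base_url (url : String) (out : String) : Prop := out = base_url_alt url
instance (url : String) (out : String) : Decidable (Spec_base_url url out) := by unfold Spec_base_url; infer_instance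

-- ===== CLAIM (what is proved, stated in full; the proofs are below) =====
def Claim_equal_base_url : Prop := ∀ (url : String), Dom_base_url url → Pre_base_url url → Spec_base_url url (base_url url)

-- ===== LEMMAS AND PROOFS =====

-- ---- proof-side abbreviations ----
def pvCuts (u : List Char) (L : List (List Char)) : List Int :=
  (L.map (fun e => PySem.Chars.find u e)).filter (fun p => decide (0 ≤ p))

def pvApply (u : List Char) (L : List (List Char)) : List Char :=
  match PySem.List.min? (pvCuts u L) id with
  | some m => u.take m.toNat
  | none => u

-- ---- min? on Int ----
lemma pv_min?_cons (x : Int) (xs : List Int) :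
    PySem.List.min? (x :: xs) id = some (xs.foldl min x) := by
  induction xs generalizing x with
  | nil => rfl
  | cons y ys ih =>
    have key : PySem.List.min? (x :: y :: ys) id = PySem.List.min? (min x y :: ys) id := by
      simp only [PySem.List.min?, List.foldl_cons]
      congr 1
      show (if id y < id x then some y else some x) = some (min x y)
      simp only [id]
      split_ifs with h
      · rw [min_eq_right (le_of_lt h)]
      · rw [min_eq_left (by omega : x ≤ y)]
    rw [key, ih (min x y), List.foldl_cons]

lemma pv_foldl_min_le (xs : List Int) (a : Int) :
    xs.foldl min a ≤ a ∧ ∀ x ∈ xs, xs.foldl min a ≤ x := by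
  induction xs generalizing a with
  | nil => simp
  | cons x xs ih =>
    obtain ⟨h1, h2⟩ := ih (min a x)
    refine ⟨le_trans h1 (min_le_left _ _), ?_⟩
    intro z hz
    rcases List.mem_cons.mp hz with rfl | hz
    · exact le_trans h1 (min_le_right _ _)
    · exact h2 z hz

lemma pv_foldl_min_choice (xs : List Int) (a : Int) :
    xs.foldl min a = a ∨ xs.foldl min a ∈ xs := by
  induction xs generalizing a with
  | nil => simp
  | cons x xs ih =>
    simp only [List.foldl_cons]
    rcases ih (min a x) with h | h
    · rcases min_choice a x with hm | hm
      · exact Or.inl (h.trans hm)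
      · exact Or.inr (by rw [h, hm]; simp)
    · exact Or.inr (List.mem_cons_of_mem _ h)

-- ---- find ----
lemma pv_find_go_nil (sep : List Char) (k : Nat) :
    PySem.Chars.find.go sep [] k = if sep.isEmpty then (k : Int) else -1 := by
  simp [PySem.Chars.find.go]

lemma pv_find_go_cons (sep : List Char) (c : Char) (l : List Char) (k : Nat) :
    PySem.Chars.find.go sep (c :: l) k =
      if sep.isPrefixOf (c :: l) = true then (k : Int) else PySem.Chars.find.go sep l (k + 1) := by
  simp [PySem.Chars.find.go]

lemma pv_find_go_succ (sep : List Char) (hs : sep ≠ []) (l : List Char) (k : Nat) :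
    PySem.Chars.find.go sep l (k + 1) =
      if PySem.Chars.find.go sep l k = -1 then -1 else PySem.Chars.find.go sep l k + 1 := by
  induction l generalizing k with
  | nil => simp [pv_find_go_nil, List.isEmpty_iff, hs]
  | cons c l ih =>
    rw [pv_find_go_cons, pv_find_go_cons]
    by_cases h : sep.isPrefixOf (c :: l) = true
    · have hk : ((k : Int)) ≠ -1 := by omega
      simp only [h, if_true]
      rw [if_neg hk]
      push_cast
      ring
    · simp only [h, Bool.false_eq_true, if_false]
      exact ih (k + 1)

lemma pv_find_nil (sep : List Char) (hs : sep ≠ []) : PySem.Chars.find [] sep = -1 := by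
  unfold PySem.Chars.find
  simp [pv_find_go_nil, List.isEmpty_iff, hs]

lemma pv_find_prefix (sep l : List Char) (hs : sep ≠ []) (h : sep.isPrefixOf l = true) :
    PySem.Chars.find l sep = 0 := by
  cases l with
  | nil =>
    exfalso
    have := List.isPrefixOf_iff_prefix.mp h
    simp at this
    exact hs this
  | cons c rest =>
    unfold PySem.Chars.find
    rw [pv_find_go_cons, if_pos h]
    simp

lemma pv_find_cons (sep : List Char) (hs : sep ≠ []) (c : Char) (l : List Char)
    (h : sep.isPrefixOf (c :: l) = false) :
    PySem.Chars.find (c :: l) sep =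
      if PySem.Chars.find l sep = -1 then -1 else PySem.Chars.find l sep + 1 := by
  unfold PySem.Chars.find
  rw [pv_find_go_cons]
  simp only [h, Bool.false_eq_true, if_false]
  exact pv_find_go_succ sep hs l 0

-- find points at the first occurrence; its value is determined by that property
lemma pv_find_eq (s f : List Char) (q : Nat) (h1 : f <+: s.drop q)
    (h2 : ∀ i, i < q → ¬ f <+: s.drop i) : PySem.Chars.find s f = q := by
  have hin : PySem.Chars.isIn f s = true :=
    (PySem.Chars.exists_prefix_drop_iff_isIn f s).mp ⟨q, h1⟩
  have hnn : 0 ≤ PySem.Chars.find s f :=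
    (PySem.Chars.find_nonneg_iff s f).mpr ((PySem.Chars.isIn_iff_infix f s).mp hin)
  obtain ⟨ha, hb⟩ := PySem.Chars.find_spec hnn
  rcases lt_trichotomy (PySem.Chars.find s f).toNat q with h | h | h
  · exact absurd ha (h2 _ h)
  · omega
  · exact absurd h1 (hb q h)

-- ---- prefixes inside a take ----
lemma pv_prefix_take (f u : List Char) (p j : Nat) :
    f <+: (u.take p).drop j ↔ f <+: u.drop j ∧ f.length ≤ p - j := by
  rw [List.drop_take, List.prefix_take_iff]

lemma pv_prefix_getElem? (f t : List Char) (i : Nat) (h : f <+: t) (hi : i < f.length) :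
    t[i]? = f[i]? := by
  obtain ⟨r, rfl⟩ := h
  exact List.getElem?_append_left hi

-- occurrences of two patterns that both start with '/' and contain no later '/' cannot overlap
lemma pv_no_overlap (u e f : List Char) (p q : Nat)
    (hp : e <+: u.drop p) (hq : f <+: u.drop q)
    (he : e[0]? = some '/') (hf : ∀ i, 0 < i → f[i]? ≠ some '/')
    (hlt : q < p) : q + f.length ≤ p := by
  by_contra hc
  have he0 : 0 < e.length := by
    cases e with
    | nil => simp at he
    | cons a t => simp
  have hup : u[p]? = some '/' := by
    have h1 : (u.drop p)[0]? = e[0]? := pv_prefix_getElem? e (u.drop p) 0 hp he0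
    rw [List.getElem?_drop] at h1
    simpa [he] using h1
  have hif : p - q < f.length := by omega
  have huq : u[p]? = f[p - q]? := by
    have h1 : (u.drop q)[p - q]? = f[p - q]? := pv_prefix_getElem? f (u.drop q) (p - q) hq hif
    rw [List.getElem?_drop] at h1
    rw [show q + (p - q) = p by omega] at h1
    exact h1
  exact hf (p - q) (by omega) (by rw [← huq, hup])

-- ---- splitOn: head of the result ----
lemma pv_go_acc (sep : List Char) : ∀ (fuel : Nat) (l cur : List Char) (acc : List (List Char)),
    PySem.Chars.splitOn.go sep fuel l cur acc =
      acc.reverse ++ PySem.Chars.splitOn.go sep fuel l cur [] := by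
  intro fuel
  induction fuel with
  | zero => intro l cur acc; simp [PySem.Chars.splitOn.go]
  | succ fuel ih =>
    intro l cur acc
    cases l with
    | nil => simp [PySem.Chars.splitOn.go]
    | cons c rest =>
      by_cases h : sep.isPrefixOf (c :: rest) = true
      · simp only [PySem.Chars.splitOn.go, h, if_true]
        rw [ih _ _ (cur.reverse :: acc), ih _ _ [cur.reverse]]
        simp
      · simp only [PySem.Chars.splitOn.go, h, Bool.false_eq_true, if_false]
        exact ih rest (c :: cur) acc

lemma pv_splitOn_go_head (sep : List Char) (hs : sep ≠ []) :
    ∀ (fuel : Nat) (l cur : List Char), l.length < fuel →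
      (PySem.Chars.splitOn.go sep fuel l cur []).headD [] =
        cur.reverse ++ (if 0 ≤ PySem.Chars.find l sep
          then l.take (PySem.Chars.find l sep).toNat else l) := by
  intro fuel
  induction fuel with
  | zero => intro l cur h; omega
  | succ fuel ih =>
    intro l cur h
    cases l with
    | nil =>
      simp [PySem.Chars.splitOn.go, pv_find_nil sep hs]
    | cons c rest =>
      by_cases hpre : sep.isPrefixOf (c :: rest) = true
      · simp only [PySem.Chars.splitOn.go, hpre, if_true]
        rw [pv_go_acc]
        simp [pv_find_prefix sep (c :: rest) hs hpre]
      · have hlen : rest.length < fuel := by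
          simp only [List.length_cons] at h
          omega
        simp only [PySem.Chars.splitOn.go, hpre, Bool.false_eq_true, if_false]
        rw [ih rest (c :: cur) hlen]
        rw [pv_find_cons sep hs c rest (by revert hpre; cases sep.isPrefixOf (c :: rest) <;> simp)]
        have hge : -1 ≤ PySem.Chars.find rest sep := PySem.Chars.neg_one_le_find rest sep
        by_cases hf : PySem.Chars.find rest sep = -1
        · simp [hf]
        · have h0 : 0 ≤ PySem.Chars.find rest sep := by omega
          have h1 : 0 ≤ PySem.Chars.find rest sep + 1 := by omega
          simp only [hf, if_false, h0, if_true, h1]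
          have h2 : (PySem.Chars.find rest sep + 1).toNat = (PySem.Chars.find rest sep).toNat + 1 := by
            omega
          rw [h2]
          simp [List.take_succ_cons]

-- A's loop body, rewritten as a take at the find position
lemma pv_cut_eq (u e : List Char) (he : e ≠ []) :
    (if PySem.Chars.isIn e u then PySem.List.pyGetD (PySem.Chars.splitOn u e) 0 [] else u) =
      if 0 ≤ PySem.Chars.find u e then u.take (PySem.Chars.find u e).toNat else u := by
  by_cases h : PySem.Chars.isIn e u = true
  · have hnn : 0 ≤ PySem.Chars.find u e :=
      (PySem.Chars.find_nonneg_iff u e).mpr ((PySem.Chars.isIn_iff_infix e u).mp h)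
    rw [if_pos h, if_pos hnn]
    have hhead : PySem.List.pyGetD (PySem.Chars.splitOn u e) 0 [] =
        (PySem.Chars.splitOn u e).headD [] := by
      rw [PySem.List.pyGetD_zero]
      cases PySem.Chars.splitOn u e <;> simp
    rw [hhead]
    unfold PySem.Chars.splitOn
    rw [pv_splitOn_go_head e he (u.length + 1) u [] (by omega)]
    simp [hnn]
  · have hno : PySem.Chars.isIn e u = false := by simpa using h
    have : PySem.Chars.find u e = -1 :=
      (PySem.Chars.find_eq_neg_one_iff u e).mpr ((PySem.Chars.isIn_eq_false_iff e u).mp hno)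
    simp [h, this]

-- find inside the cut prefix
lemma pv_find_take (u e f : List Char)
    (hge : e[0]? = some '/') (hgf0 : f[0]? = some '/') (hgf : ∀ i, 0 < i → f[i]? ≠ some '/')
    (hp : 0 ≤ PySem.Chars.find u e) :
    PySem.Chars.find (u.take (PySem.Chars.find u e).toNat) f =
      if 0 ≤ PySem.Chars.find u f ∧ PySem.Chars.find u f < PySem.Chars.find u e
        then PySem.Chars.find u f else -1 := by
  have hf0 : 0 < f.length := by
    cases f with
    | nil => simp at hgf0
    | cons a t => simp
  obtain ⟨hpe, hpm⟩ := PySem.Chars.find_spec hp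
  split_ifs with h
  · obtain ⟨hqn, hqlt⟩ := h
    obtain ⟨hqe, hqm⟩ := PySem.Chars.find_spec hqn
    have hql : (PySem.Chars.find u f).toNat < (PySem.Chars.find u e).toNat := by omega
    have hov : (PySem.Chars.find u f).toNat + f.length ≤ (PySem.Chars.find u e).toNat :=
      pv_no_overlap u e f _ _ hpe hqe hge hgf hql
    have hres := pv_find_eq (u.take (PySem.Chars.find u e).toNat) f (PySem.Chars.find u f).toNat
      ((pv_prefix_take f u _ _).mpr ⟨hqe, by omega⟩)
      (fun i hi hc => hqm i hi ((pv_prefix_take f u _ _).mp hc).1)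
    rw [hres]
    omega
  · rw [PySem.Chars.find_eq_neg_one_iff]
    intro hinf
    obtain ⟨j, hj⟩ := (PySem.Chars.exists_prefix_drop_iff_isIn f _).mpr
      ((PySem.Chars.isIn_iff_infix f _).mpr hinf)
    obtain ⟨hj1, hj2⟩ := (pv_prefix_take f u _ j).mp hj
    have hjp : j < (PySem.Chars.find u e).toNat := by omega
    have hin : 0 ≤ PySem.Chars.find u f := by
      apply (PySem.Chars.find_nonneg_iff u f).mpr
      apply (PySem.Chars.isIn_iff_infix f u).mp
      exact (PySem.Chars.exists_prefix_drop_iff_isIn f u).mp ⟨j, hj1⟩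
    obtain ⟨hqe, hqm⟩ := PySem.Chars.find_spec hin
    have hqj : (PySem.Chars.find u f).toNat ≤ j := by
      by_contra hqj
      exact hqm j (by omega) hj1
    have hge3 : PySem.Chars.find u e ≤ PySem.Chars.find u f := by
      by_contra hx
      exact h ⟨hin, by omega⟩
    omega

-- the cuts of the cut prefix are the original cuts below the cut position
lemma pv_cuts_take (u : List Char) (L : List (List Char)) (e : List Char)
    (hge : e[0]? = some '/')
    (hgood : ∀ f ∈ L, f[0]? = some '/' ∧ ∀ i, 0 < i → f[i]? ≠ some '/')
    (hp : 0 ≤ PySem.Chars.find u e) :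
    pvCuts (u.take (PySem.Chars.find u e).toNat) L =
      (pvCuts u L).filter (fun q => decide (q < PySem.Chars.find u e)) := by
  induction L with
  | nil => rfl
  | cons f L ih =>
    obtain ⟨hf0, hfs⟩ := hgood f (by simp)
    have hrec := ih (fun g hg => hgood g (by simp [hg]))
    have hft := pv_find_take u e f hge hf0 hfs hp
    simp only [pvCuts] at hrec ⊢
    simp only [List.map_cons, List.filter_cons]
    rw [hft]
    by_cases h : 0 ≤ PySem.Chars.find u f ∧ PySem.Chars.find u f < PySem.Chars.find u e
    · rw [if_pos h]
      simp [hrec, h.1, h.2]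
    · rw [if_neg h]
      by_cases hq : 0 ≤ PySem.Chars.find u f
      · have hge2 : ¬ (PySem.Chars.find u f < PySem.Chars.find u e) := fun hlt => h ⟨hq, hlt⟩
        simp [hrec, hq, hge2]
      · simp [hrec, hq]

-- main loop lemma: A's fold equals one cut at the minimal find position
lemma pv_fold_eq (L : List (List Char))
    (hgood : ∀ f ∈ L, f[0]? = some '/' ∧ ∀ i, 0 < i → f[i]? ≠ some '/') :
    ∀ (u : List Char),
    L.foldl (fun u e => if PySem.Chars.isIn e u then
        PySem.List.pyGetD (PySem.Chars.splitOn u e) 0 [] else u) u = pvApply u L := by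
  induction L with
  | nil => intro u; rfl
  | cons e L ih =>
    intro u
    obtain ⟨he0, _⟩ := hgood e (by simp)
    have hgL : ∀ f ∈ L, f[0]? = some '/' ∧ ∀ i, 0 < i → f[i]? ≠ some '/' :=
      fun f hf => hgood f (by simp [hf])
    have hene : e ≠ [] := by
      cases e with
      | nil => simp at he0
      | cons a t => simp
    simp only [List.foldl_cons]
    rw [pv_cut_eq u e hene]
    by_cases hf : 0 ≤ PySem.Chars.find u e
    · rw [if_pos hf, ih hgL (u.take (PySem.Chars.find u e).toNat)]
      have hcuts := pv_cuts_take u L e he0 hgL hf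
      unfold pvApply
      rw [hcuts]
      have hre : pvCuts u (e :: L) = PySem.Chars.find u e :: pvCuts u L := by
        simp [pvCuts, hf]
      rw [hre, pv_min?_cons]
      have hcs_nonneg : ∀ x ∈ pvCuts u L, 0 ≤ x := by
        intro x hx
        have := List.of_mem_filter hx
        simpa using this
      have hMle := pv_foldl_min_le (pvCuts u L) (PySem.Chars.find u e)
      have hMch := pv_foldl_min_choice (pvCuts u L) (PySem.Chars.find u e)
      rcases hcf : (pvCuts u L).filter (fun q => decide (q < PySem.Chars.find u e)) with _ | ⟨c, cf⟩
      · -- no cut below find u e : the overall minimum is find u e itself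
        have hall : ∀ x ∈ pvCuts u L, ¬ (x < PySem.Chars.find u e) := by
          intro x hx hlt
          have hmem : x ∈ (pvCuts u L).filter (fun q => decide (q < PySem.Chars.find u e)) :=
            List.mem_filter.mpr ⟨hx, by simp [hlt]⟩
          rw [hcf] at hmem
          simp at hmem
        have hMfe : (pvCuts u L).foldl min (PySem.Chars.find u e) = PySem.Chars.find u e := by
          rcases hMch with h | h
          · exact h
          · have h1 := hMle.2 _ h
            have h2 := hall _ h
            omega
        rw [hMfe]
        rfl
      · -- some cut below find u e : both minima coincide
        rw [pv_min?_cons]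
        have hc_mem : c ∈ (pvCuts u L).filter (fun q => decide (q < PySem.Chars.find u e)) := by
          rw [hcf]; simp
      -- the minimum m of the filtered cuts
        have hmle := pv_foldl_min_le cf c
        have hmch := pv_foldl_min_choice cf c
        have hm_mem : cf.foldl min c ∈
            (pvCuts u L).filter (fun q => decide (q < PySem.Chars.find u e)) := by
          rcases hmch with h | h
          · rw [hcf, h]; simp
          · rw [hcf]; exact List.mem_cons_of_mem _ h
        have hm_cs : cf.foldl min c ∈ pvCuts u L := (List.mem_filter.mp hm_mem).1
        have hm_lt : cf.foldl min c < PySem.Chars.find u e := by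
          have := (List.mem_filter.mp hm_mem).2
          simpa using this
        have hMm : (pvCuts u L).foldl min (PySem.Chars.find u e) ≤ cf.foldl min c :=
          hMle.2 _ hm_cs
        have hMcs : (pvCuts u L).foldl min (PySem.Chars.find u e) ∈ pvCuts u L := by
          rcases hMch with h | h
          · exfalso; rw [h] at hMm; omega
          · exact h
        have hM0 : 0 ≤ (pvCuts u L).foldl min (PySem.Chars.find u e) := hcs_nonneg _ hMcs
        have hMlt : (pvCuts u L).foldl min (PySem.Chars.find u e) < PySem.Chars.find u e := by
          omega
        have hMfl : (pvCuts u L).foldl min (PySem.Chars.find u e) ∈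
            (pvCuts u L).filter (fun q => decide (q < PySem.Chars.find u e)) :=
          List.mem_filter.mpr ⟨hMcs, by simp [hMlt]⟩
        have hmM : cf.foldl min c ≤ (pvCuts u L).foldl min (PySem.Chars.find u e) := by
          rw [hcf] at hMfl
          rcases List.mem_cons.mp hMfl with h | h
          · rw [h]; exact hmle.1
          · exact hmle.2 _ h
        have heq : (pvCuts u L).foldl min (PySem.Chars.find u e) = cf.foldl min c :=
          le_antisymm hMm hmM
        have hm0 : 0 ≤ cf.foldl min c := by omega
        show List.take (cf.foldl min c).toNat (List.take (PySem.Chars.find u e).toNat u) =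
          List.take ((pvCuts u L).foldl min (PySem.Chars.find u e)).toNat u
        rw [List.take_take, heq]
        congr 1
        omega
    · rw [if_neg hf, ih hgL u]
      unfold pvApply
      have : pvCuts u (e :: L) = pvCuts u L := by
        simp [pvCuts, hf]
      rw [this]

-- the four literal suffixes have a '/' only at position 0
lemma pv_tail_no_slash (f : List Char) (h : f.tail.all (fun c => decide (c ≠ '/')) = true) :
    ∀ i, 0 < i → f[i]? ≠ some '/' := by
  intro i hi hc
  have hmem : '/' ∈ f.tail := by
    cases f with
    | nil => simp at hc
    | cons a t =>
      cases i with
      | zero => omega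
      | succ j =>
        simp only [List.getElem?_cons_succ] at hc
        simpa using List.mem_of_getElem? hc
  have := List.all_eq_true.mp h _ hmem
  simp at this

lemma pv_good_toRemove :
    ∀ f ∈ pvToRemove, f[0]? = some '/' ∧ ∀ i, 0 < i → f[i]? ≠ some '/' := by
  intro f hf
  simp only [pvToRemove, List.mem_cons, List.not_mem_nil, or_false] at hf
  rcases hf with rfl | rfl | rfl | rfl <;>
    exact ⟨by decide, pv_tail_no_slash _ (by decide)⟩

-- B's single slice equals the minimal cut
lemma pv_alt_cut (u : List Char) :
    (match PySem.List.min? (pvCuts u pvToRemove) id with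
      | some m => PySem.Chars.slice u none (some m)
      | none => u) = pvApply u pvToRemove := by
  unfold pvApply
  rcases hmin : PySem.List.min? (pvCuts u pvToRemove) id with _ | m
  · rfl
  · have hm : m ∈ pvCuts u pvToRemove := PySem.List.min?_mem hmin
    have h0 : 0 ≤ m := by
      have := List.of_mem_filter hm
      simpa using this
    simp only []
    rw [show PySem.Chars.slice u none (some m) = PySem.List.slice u none (some m) from
      PySem.Chars.slice_eq_listSlice u none (some m)]
    exact PySem.List.slice_to u h0

-- ===== VERDICT (by name: the statement is the Claim_ definition above) =====
theorem base_url_spec : Claim_equal_base_url := by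
  intro url _ _
  unfold Spec_base_url
  simp only [base_url, base_url_alt]
  rw [pv_fold_eq pvToRemove pv_good_toRemove url.toList]
  have hsuff : pvSuffixes = pvToRemove := rfl
  rw [hsuff]
  rw [show ((pvToRemove.map (fun e => PySem.Chars.find url.toList e)).filter
      (fun p => decide (0 ≤ p))) = pvCuts url.toList pvToRemove from rfl]
  rw [pv_alt_cut url.toList]
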